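-- pv_equiv track=rewrite | github.com/rysweet/azure-tenant-grapher | src/threat_modeling_agent/tmt_runner.py | _infer_component_type
-- ===== SOURCE A (Python) =====
-- def _infer_component_type(label: str) -> str:
--     """
--     Infer Azure resource type from DFD component label.
--     """
--     label_lower = label.lower()
--
--     if any(
--         keyword in label_lower
--         for keyword in ["web app", "webapp", "api", "app service"]
--     ):
--         return "Microsoft.Web/sites"
--     elif any(keyword in label_lower for keyword in ["database", "sql", "db"]):
--         return "Microsoft.Sql/servers"
--     elif any(keyword in label_lower for keyword in ["storage", "blob", "file"]):
--         return "Microsoft.Storage/storageAccounts"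
--     elif any(
--         keyword in label_lower for keyword in ["vm", "virtual machine", "server"]
--     ):
--         return "Microsoft.Compute/virtualMachines"
--     elif any(keyword in label_lower for keyword in ["network", "vnet", "subnet"]):
--         return "Microsoft.Network/virtualNetworks"
--     elif any(
--         keyword in label_lower for keyword in ["key vault", "keyvault", "secrets"]
--     ):
--         return "Microsoft.KeyVault/vaults"
--     else:
--         return "Microsoft.Resources/resourceGroups"  # Default fallback
-- ===== SOURCE B (Python) =====
-- # Flat keyword->priority scoring: scan ALL keywords once, keep the minimum
-- # priority among matches, then index the type table.  (No first-match chain.)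
-- _KEYWORD_PRIORITY = {
--     "web app": 0, "webapp": 0, "api": 0, "app service": 0,
--     "database": 1, "sql": 1, "db": 1,
--     "storage": 2, "blob": 2, "file": 2,
--     "vm": 3, "virtual machine": 3, "server": 3,
--     "network": 4, "vnet": 4, "subnet": 4,
--     "key vault": 5, "keyvault": 5, "secrets": 5,
-- }
--
-- _TYPES = [
--     "Microsoft.Web/sites",
--     "Microsoft.Sql/servers",
--     "Microsoft.Storage/storageAccounts",
--     "Microsoft.Compute/virtualMachines",
--     "Microsoft.Network/virtualNetworks",
--     "Microsoft.KeyVault/vaults",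
--     "Microsoft.Resources/resourceGroups",  # default fallback
-- ]
--
--
-- def _infer_component_type(label: str) -> str:
--     low = label.lower()
--     best = 6
--     for kw, prio in _KEYWORD_PRIORITY.items():
--         if prio < best and kw in low:
--             best = prio
--     return _TYPES[best]
-- ===== Notes on version B (the rewrite author's own statement) =====
-- stated objective: alternative
-- what changed: Replaces the six-branch if/elif first-match chain with a single flat pass over a keyword->priority map keeping the minimum matching priority, then indexing a type table; min group index equals the first matching branch.
import Mathlib
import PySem

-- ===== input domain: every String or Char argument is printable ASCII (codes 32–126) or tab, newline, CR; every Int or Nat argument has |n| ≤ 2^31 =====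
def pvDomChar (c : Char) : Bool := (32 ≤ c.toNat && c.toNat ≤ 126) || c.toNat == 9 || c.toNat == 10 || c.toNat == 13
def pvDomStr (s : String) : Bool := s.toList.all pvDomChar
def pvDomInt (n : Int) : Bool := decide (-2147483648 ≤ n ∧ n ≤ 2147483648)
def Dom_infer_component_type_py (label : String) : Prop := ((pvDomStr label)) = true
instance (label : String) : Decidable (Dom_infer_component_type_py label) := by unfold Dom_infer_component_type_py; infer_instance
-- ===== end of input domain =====

-- B replaces A's six-branch first-match if/elif chain by one flat min-priority scoring pass
-- over all keywords plus a table lookup; objective: alternative algorithm, same cost.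

-- ===== PORT A =====
def infer_component_type_py (label : String) : String :=
  let label_lower := PySem.Str.lower label
  if ["web app", "webapp", "api", "app service"].any (fun k => PySem.Str.isIn k label_lower) then
    "Microsoft.Web/sites"
  else if ["database", "sql", "db"].any (fun k => PySem.Str.isIn k label_lower) then
    "Microsoft.Sql/servers"
  else if ["storage", "blob", "file"].any (fun k => PySem.Str.isIn k label_lower) then
    "Microsoft.Storage/storageAccounts"
  else if ["vm", "virtual machine", "server"].any (fun k => PySem.Str.isIn k label_lower) then
    "Microsoft.Compute/virtualMachines"
  else if ["network", "vnet", "subnet"].any (fun k => PySem.Str.isIn k label_lower) then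
    "Microsoft.Network/virtualNetworks"
  else if ["key vault", "keyvault", "secrets"].any (fun k => PySem.Str.isIn k label_lower) then
    "Microsoft.KeyVault/vaults"
  else
    "Microsoft.Resources/resourceGroups"

-- ===== PORT B =====
-- flat keyword -> priority association (insertion order of Source B's dict)
def pvKeywordPriority : List (String × Nat) :=
  [ ("web app", 0), ("webapp", 0), ("api", 0), ("app service", 0)
  , ("database", 1), ("sql", 1), ("db", 1)
  , ("storage", 2), ("blob", 2), ("file", 2)
  , ("vm", 3), ("virtual machine", 3), ("server", 3)
  , ("network", 4), ("vnet", 4), ("subnet", 4)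
  , ("key vault", 5), ("keyvault", 5), ("secrets", 5) ]

def pvTypes : List String :=
  [ "Microsoft.Web/sites"
  , "Microsoft.Sql/servers"
  , "Microsoft.Storage/storageAccounts"
  , "Microsoft.Compute/virtualMachines"
  , "Microsoft.Network/virtualNetworks"
  , "Microsoft.KeyVault/vaults"
  , "Microsoft.Resources/resourceGroups" ]

def infer_component_type_py_alt (label : String) : String :=
  let low := PySem.Str.lower label
  let best := pvKeywordPriority.foldl
    (fun best kp => if kp.2 < best && PySem.Str.isIn kp.1 low then kp.2 else best) 6
  -- _TYPES[best]: best is always 0..6, so plain list indexing (getD never defaults)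
  pvTypes.getD best "Microsoft.Resources/resourceGroups"

-- ===== PRECONDITION & SPEC =====
def Spec_infer_component_type_py (label : String) (out : String) : Prop := out = infer_component_type_py_alt label
instance (label : String) (out : String) : Decidable (Spec_infer_component_type_py label out) := by unfold Spec_infer_component_type_py; infer_instance

-- ===== CLAIM (what is proved, stated in full; the proofs are below) =====
def Claim_equal_infer_component_type_py : Prop := ∀ (label : String), Dom_infer_component_type_py label → Spec_infer_component_type_py label (infer_component_type_py label)

-- ===== LEMMAS AND PROOFS =====

-- key lemma: with the substring test abstracted as an opaque f, both computations agree;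
-- proved by a linear chain of case splits, one per keyword, evaluating the fold step by step
set_option maxHeartbeats 2000000 in
theorem pvTableKey (f : String → Bool) :
    (if ["web app", "webapp", "api", "app service"].any f then "Microsoft.Web/sites"
     else if ["database", "sql", "db"].any f then "Microsoft.Sql/servers"
     else if ["storage", "blob", "file"].any f then "Microsoft.Storage/storageAccounts"
     else if ["vm", "virtual machine", "server"].any f then "Microsoft.Compute/virtualMachines"
     else if ["network", "vnet", "subnet"].any f then "Microsoft.Network/virtualNetworks"
     else if ["key vault", "keyvault", "secrets"].any f then "Microsoft.KeyVault/vaults"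
     else "Microsoft.Resources/resourceGroups")
    = pvTypes.getD
        (pvKeywordPriority.foldl (fun best kp => if kp.2 < best && f kp.1 then kp.2 else best) 6)
        "Microsoft.Resources/resourceGroups" := by
  unfold pvKeywordPriority
  simp only [List.any_cons, List.any_nil, Bool.or_false, Bool.or_eq_true]
  rw [List.foldl_cons]
  generalize f "web app" = b01
  cases b01 with
  | true => simp [pvTypes]
  | false =>
  simp only [Bool.and_false, Bool.false_eq_true, if_false]
  rw [List.foldl_cons]
  generalize f "webapp" = b02
  cases b02 with
  | true => simp [pvTypes]
  | false =>
  simp only [Bool.and_false, Bool.false_eq_true, if_false]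
  rw [List.foldl_cons]
  generalize f "api" = b03
  cases b03 with
  | true => simp [pvTypes]
  | false =>
  simp only [Bool.and_false, Bool.false_eq_true, if_false]
  rw [List.foldl_cons]
  generalize f "app service" = b04
  cases b04 with
  | true => simp [pvTypes]
  | false =>
  simp only [Bool.and_false, Bool.false_eq_true, if_false]
  rw [List.foldl_cons]
  generalize f "database" = b05
  cases b05 with
  | true => simp [pvTypes]
  | false =>
  simp only [Bool.and_false, Bool.false_eq_true, if_false]
  rw [List.foldl_cons]
  generalize f "sql" = b06
  cases b06 with
  | true => simp [pvTypes]
  | false =>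
  simp only [Bool.and_false, Bool.false_eq_true, if_false]
  rw [List.foldl_cons]
  generalize f "db" = b07
  cases b07 with
  | true => simp [pvTypes]
  | false =>
  simp only [Bool.and_false, Bool.false_eq_true, if_false]
  rw [List.foldl_cons]
  generalize f "storage" = b08
  cases b08 with
  | true => simp [pvTypes]
  | false =>
  simp only [Bool.and_false, Bool.false_eq_true, if_false]
  rw [List.foldl_cons]
  generalize f "blob" = b09
  cases b09 with
  | true => simp [pvTypes]
  | false =>
  simp only [Bool.and_false, Bool.false_eq_true, if_false]
  rw [List.foldl_cons]
  generalize f "file" = b10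
  cases b10 with
  | true => simp [pvTypes]
  | false =>
  simp only [Bool.and_false, Bool.false_eq_true, if_false]
  rw [List.foldl_cons]
  generalize f "vm" = b11
  cases b11 with
  | true => simp [pvTypes]
  | false =>
  simp only [Bool.and_false, Bool.false_eq_true, if_false]
  rw [List.foldl_cons]
  generalize f "virtual machine" = b12
  cases b12 with
  | true => simp [pvTypes]
  | false =>
  simp only [Bool.and_false, Bool.false_eq_true, if_false]
  rw [List.foldl_cons]
  generalize f "server" = b13
  cases b13 with
  | true => simp [pvTypes]
  | false =>
  simp only [Bool.and_false, Bool.false_eq_true, if_false]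
  rw [List.foldl_cons]
  generalize f "network" = b14
  cases b14 with
  | true => simp [pvTypes]
  | false =>
  simp only [Bool.and_false, Bool.false_eq_true, if_false]
  rw [List.foldl_cons]
  generalize f "vnet" = b15
  cases b15 with
  | true => simp [pvTypes]
  | false =>
  simp only [Bool.and_false, Bool.false_eq_true, if_false]
  rw [List.foldl_cons]
  generalize f "subnet" = b16
  cases b16 with
  | true => simp [pvTypes]
  | false =>
  simp only [Bool.and_false, Bool.false_eq_true, if_false]
  rw [List.foldl_cons]
  generalize f "key vault" = b17
  cases b17 with
  | true => simp [pvTypes]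
  | false =>
  simp only [Bool.and_false, Bool.false_eq_true, if_false]
  rw [List.foldl_cons]
  generalize f "keyvault" = b18
  cases b18 with
  | true => simp [pvTypes]
  | false =>
  simp only [Bool.and_false, Bool.false_eq_true, if_false]
  rw [List.foldl_cons]
  generalize f "secrets" = b19
  cases b19 with
  | true => simp [pvTypes]
  | false =>
  simp only [Bool.and_false, Bool.false_eq_true, if_false]
  simp [pvTypes]

-- ===== VERDICT (by name: the statement is the Claim_ definition above) =====
theorem infer_component_type_py_spec : Claim_equal_infer_component_type_py := by
  intro label _
  exact pvTableKey (fun k => PySem.Str.isIn k (PySem.Str.lower label))
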